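-- pv_equiv track=rewrite | github.com/konskor/Uni-Assignments | Artificial Intelligence/Project3/kakuro.py | Domain_values
-- ===== SOURCE A (Python) =====
-- def Domain_values(str_domain, num_variables, current_sum, sum_constraint):
--
--     # Recursively produce values that are acceptable for our encapsulated variable ==> "line"
--     # Final product will be a list of these values , for example: ["12","21"]
--
--     # Acceptable values are those that satisfy both (all_diff) and (sum_constraint)
--
--     if( len(str_domain) == num_variables):      #base case
--
--         if( current_sum != sum_constraint):
--             return False
--
--         return True
--
--     result_list = []
--
--     for i in range(1,10):
--
--         if( (str(i) in str_domain) or (current_sum + i > sum_constraint) ) : continue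
--
--         new_sum = current_sum + i
--         new_str_domain = str_domain + str(i)
--
--         result = Domain_values(new_str_domain, num_variables, new_sum, sum_constraint)
--
--         if result is False: continue
--         elif result is True:
--             result_list.append(new_str_domain)
--         else:
--             result_list = result_list + result
--
--
--     return result_list
-- ===== SOURCE B (Python) =====
-- def Domain_values(str_domain, num_variables, current_sum, sum_constraint):
--     # Iterative level-by-level permutation building with one final sum filter,
--     # instead of A's recursive pruned DFS.
--     forbidden = set(str_domain)
--     avail = [d for d in range(1, 10) if str(d) not in forbidden]
--     length = num_variables - len(str_domain)
--     if length < 0 or length > len(avail):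
--         return []
--     seqs = [((), 0)]
--     for _ in range(length):
--         seqs = [(t + (d,), s + d) for (t, s) in seqs for d in avail if d not in t]
--     return [str_domain + ''.join(map(str, t))
--             for (t, s) in seqs if current_sum + s == sum_constraint]
-- ===== Notes on version B (the rewrite author's own statement) =====
-- stated objective: alternative
-- what changed: Replaces A's recursive backtracking DFS (with partial-sum pruning and boolean base-case signalling) by an iterative level-by-level build of all distinct-digit extension tuples over the precomputed available-digit list, followed by a single final sum filter.
-- outside the precondition, e.g. on Domain_values('12', 2, 3, 3): A returns True, B returns ['12']; on Domain_values('12', 2, 3, 4): A returns False, B returns []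
import Mathlib
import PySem

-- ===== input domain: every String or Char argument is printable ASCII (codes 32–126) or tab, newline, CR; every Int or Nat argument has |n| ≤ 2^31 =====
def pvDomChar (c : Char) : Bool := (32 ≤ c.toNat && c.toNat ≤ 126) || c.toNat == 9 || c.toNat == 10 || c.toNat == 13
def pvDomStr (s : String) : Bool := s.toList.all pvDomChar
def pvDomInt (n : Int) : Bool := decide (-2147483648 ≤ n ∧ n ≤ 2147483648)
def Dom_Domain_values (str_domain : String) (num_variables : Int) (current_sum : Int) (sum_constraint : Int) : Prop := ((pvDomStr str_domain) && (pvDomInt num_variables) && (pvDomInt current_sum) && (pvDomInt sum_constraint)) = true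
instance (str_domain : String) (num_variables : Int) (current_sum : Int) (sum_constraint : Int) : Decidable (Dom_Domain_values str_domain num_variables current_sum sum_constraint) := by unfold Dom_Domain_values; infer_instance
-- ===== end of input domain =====

-- B replaces A's recursive pruned DFS by iterative level-by-level permutation building with one
-- final sum filter (alternative decomposition, similar cost).

-- ===== PORT A =====
-- A's recursion returns False/True at its base case and a list otherwise: modelled as
-- Bool ⊕ List. The Nat fuel (10) only totalizes the recursion: every recursive call adds a
-- previously absent digit character, so the depth below any call never exceeds 9.
def dvAux : Nat → List Char → Int → Int → Int → Bool ⊕ List (List Char)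
  | 0, _, _, _, _ => Sum.inr []
  | fuel+1, sd, nv, cs, sc =>
    if (sd.length : Int) = nv then
      (if cs ≠ sc then Sum.inl false else Sum.inl true)
    else
      Sum.inr ((PySem.List.pyRange 1 10 1).foldl (fun acc i =>
        if PySem.Chars.isIn (PySem.Int.toChars i) sd || decide (cs + i > sc) then acc
        else
          match dvAux fuel (sd ++ PySem.Int.toChars i) nv (cs + i) sc with
          | Sum.inl false => acc
          | Sum.inl true  => acc ++ [sd ++ PySem.Int.toChars i]
          | Sum.inr r     => acc ++ r) [])

def Domain_values (str_domain : String) (num_variables : Int) (current_sum : Int) (sum_constraint : Int) : List String :=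
  match dvAux 10 str_domain.toList num_variables current_sum sum_constraint with
  | Sum.inr l => l.map String.ofList
  | Sum.inl _ => []

-- ===== PORT B =====
-- one expansion level: seqs = [(t+(d,), s+d) for (t,s) in seqs for d in avail if d not in t]
def dvStep (avail : List Int) (seqs : List (List Int × Int)) : List (List Int × Int) :=
  seqs.flatMap (fun p => (avail.filter (fun d => ! p.1.contains d)).map (fun d => (p.1 ++ [d], p.2 + d)))

def Domain_values_alt (str_domain : String) (num_variables : Int) (current_sum : Int) (sum_constraint : Int) : List String :=
  let sdl := str_domain.toList
  let forbidden : PySem.Set (List Char) := PySem.Set.ofList (sdl.map (fun c => [c]))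
  let avail := (PySem.List.pyRange 1 10 1).filter (fun d => ! PySem.Set.contains forbidden (PySem.Int.toChars d))
  let L : Int := num_variables - (sdl.length : Int)
  if L < 0 || (avail.length : Int) < L then []
  else
    ((List.range L.toNat).foldl (fun s _ => dvStep avail s) [([], (0 : Int))]).filterMap
      (fun p => if current_sum + p.2 = sum_constraint
                then some (String.ofList (sdl ++ p.1.flatMap PySem.Int.toChars)) else none)

-- ===== PRECONDITION & SPEC =====
-- Pre_ excludes exactly the inputs with len(str_domain) == num_variables, on which A returns a
-- bare boolean (True/False) instead of a list of strings (a value outside the declared type).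
def Pre_Domain_values (str_domain : String) (num_variables : Int) (current_sum : Int) (sum_constraint : Int) : Prop :=
  (str_domain.toList.length : Int) ≠ num_variables
instance (str_domain : String) (num_variables : Int) (current_sum : Int) (sum_constraint : Int) : Decidable (Pre_Domain_values str_domain num_variables current_sum sum_constraint) := by unfold Pre_Domain_values; infer_instance

def pvWitness_Domain_values : String × Int × Int × Int := ("", 2, 0, 8)

def Spec_Domain_values (str_domain : String) (num_variables : Int) (current_sum : Int) (sum_constraint : Int) (out : List String) : Prop := out = Domain_values_alt str_domain num_variables current_sum sum_constraint
instance (str_domain : String) (num_variables : Int) (current_sum : Int) (sum_constraint : Int) (out : List String) : Decidable (Spec_Domain_values str_domain num_variables current_sum sum_constraint out) := by unfold Spec_Domain_values; infer_instance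

-- ===== CLAIM (what is proved, stated in full; the proofs are below) =====
def Claim_equal_Domain_values : Prop := ∀ (str_domain : String) (num_variables : Int) (current_sum : Int) (sum_constraint : Int), Dom_Domain_values str_domain num_variables current_sum sum_constraint → Pre_Domain_values str_domain num_variables current_sum sum_constraint → Spec_Domain_values str_domain num_variables current_sum sum_constraint (Domain_values str_domain num_variables current_sum sum_constraint)

-- ===== LEMMAS AND PROOFS =====

-- available digits of a state, in A's terms
def availOf (sd : List Char) : List Int :=
  (PySem.List.pyRange 1 10 1).filter (fun d => ! PySem.Chars.isIn (PySem.Int.toChars d) sd)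

-- DFS-shaped spec of the distinct-digit sequences of length L drawn from avail, in order
def seqsD : List Int → Nat → List (List Int × Int)
  | _, 0 => [([], 0)]
  | avail, L+1 => avail.flatMap (fun d =>
      (seqsD (avail.filter (fun e => ! (e == d))) L).map (fun u => (d :: u.1, d + u.2)))

def ansD (sd : List Char) (cs sc : Int) (L : Nat) : List (List Char) :=
  (seqsD (availOf sd) L).filterMap (fun u =>
    if cs + u.2 = sc then some (sd ++ u.1.flatMap PySem.Int.toChars) else none)


-- ---------- basic facts ----------
theorem pv_contains_singleton {α : Type} [BEq α] [LawfulBEq α] (d e : α) :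
    ([d].contains e) = (e == d) := by
  by_cases h : e = d <;> simp [h]

theorem pv_mem_pyR : ∀ a ∈ PySem.List.pyRange 1 10 1, 1 ≤ a ∧ a ≤ 9 := by decide

theorem pv_toChars_digit (d : Int) (h1 : 1 ≤ d) (h2 : d ≤ 9) :
    PySem.Int.toChars d = [Char.ofNat (48 + d.toNat)] := by
  interval_cases d <;> rfl

theorem pv_digitChar_beq (e d : Int) (he1 : 1 ≤ e) (he2 : e ≤ 9) (hd1 : 1 ≤ d) (hd2 : d ≤ 9) :
    ((Char.ofNat (48 + e.toNat)) == (Char.ofNat (48 + d.toNat))) = (e == d) := by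
  interval_cases e <;> interval_cases d <;> rfl

theorem pv_isIn_single (c : Char) (l : List Char) :
    PySem.Chars.isIn [c] l = l.contains c := by
  by_cases h : c ∈ l
  · have hin : [c] <:+: l := by
      obtain ⟨s, t, rfl⟩ := List.append_of_mem h
      exact ⟨s, t, by simp⟩
    simp [(PySem.Chars.isIn_iff_infix _ _).mpr hin, h]
  · have hni : ¬ [c] <:+: l := fun hin => h (hin.subset (by simp))
    simp [(PySem.Chars.isIn_eq_false_iff _ _).mpr hni, h]

-- ---------- list helpers ----------
theorem pv_flatMap_congr_mem {α β : Type} (l : List α) (f g : α → List β)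
    (h : ∀ a ∈ l, f a = g a) : l.flatMap f = l.flatMap g := by
  induction l with
  | nil => rfl
  | cons x t ih =>
    simp only [List.flatMap_cons, h x (by simp), ih (fun a ha => h a (by simp [ha]))]

theorem pv_flatMap_filter_eq {α β : Type} (l : List α) (q : α → Bool) (f : α → List β)
    (h : ∀ a ∈ l, q a = false → f a = []) : l.flatMap f = (l.filter q).flatMap f := by
  induction l with
  | nil => rfl
  | cons x t ih =>
    have ih' := ih (fun a ha hq => h a (by simp [ha]) hq)
    by_cases hx : q x = true
    · simp [List.filter_cons, hx, ih']
    · simp only [Bool.not_eq_true] at hx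
      simp [List.filter_cons, hx, h x (by simp) hx, ih']

theorem pv_filterMap_flatMap {α β γ : Type} (l : List α) (g : α → List β) (f : β → Option γ) :
    (l.flatMap g).filterMap f = l.flatMap (fun a => (g a).filterMap f) := by
  induction l with
  | nil => rfl
  | cons x t ih => simp [List.flatMap_cons, List.filterMap_append, ih]

-- ---------- dvStep / iterate facts ----------
theorem pv_dvStep_nil (A : List Int) : dvStep A [] = [] := rfl

theorem pv_dvStep_append (A : List Int) (xs ys : List (List Int × Int)) :
    dvStep A (xs ++ ys) = dvStep A xs ++ dvStep A ys := by simp [dvStep]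

theorem pv_iter_nil (A : List Int) (L : Nat) : (dvStep A)^[L] [] = [] := by
  induction L with
  | zero => rfl
  | succ L ih => rw [Function.iterate_succ_apply, pv_dvStep_nil, ih]

theorem pv_iter_append (A : List Int) (L : Nat) (xs ys : List (List Int × Int)) :
    (dvStep A)^[L] (xs ++ ys) = (dvStep A)^[L] xs ++ (dvStep A)^[L] ys := by
  induction L generalizing xs ys with
  | zero => rfl
  | succ L ih => rw [Function.iterate_succ_apply, pv_dvStep_append, ih,
      Function.iterate_succ_apply, Function.iterate_succ_apply]

theorem pv_iter_flatMap (A : List Int) (L : Nat) (l : List (List Int × Int)) :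
    (dvStep A)^[L] l = l.flatMap (fun x => (dvStep A)^[L] [x]) := by
  induction l with
  | nil => simp [pv_iter_nil]
  | cons x t ih =>
    have hx : x :: t = [x] ++ t := rfl
    rw [hx, pv_iter_append, ih]; simp

theorem pv_foldl_range_iter (A : List Int) (L : Nat) (init : List (List Int × Int)) :
    (List.range L).foldl (fun s _ => dvStep A s) init = (dvStep A)^[L] init := by
  induction L with
  | zero => rfl
  | succ L ih =>
    rw [List.range_succ, List.foldl_append, ih, List.foldl_cons, List.foldl_nil,
      Function.iterate_succ_apply']

theorem pv_dvStep_singleton (A : List Int) (t : List Int) (s : Int) :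
    dvStep A [(t, s)] = (A.filter (fun d => ! t.contains d)).map (fun d => (t ++ [d], s + d)) := by
  simp [dvStep]

theorem pv_filter_append_contains (A t : List Int) (d : Int) :
    A.filter (fun e => ! (t ++ [d]).contains e)
      = (A.filter (fun e => ! t.contains e)).filter (fun e => ! (e == d)) := by
  rw [List.filter_filter]
  apply List.filter_congr
  intro e _
  rw [List.contains_append, pv_contains_singleton]
  cases h1 : t.contains e <;> cases h2 : (e == d) <;> rfl

theorem pv_shift (L : Nat) : ∀ (A t : List Int) (s : Int),
    (dvStep A)^[L] [(t, s)]
      = ((dvStep (A.filter (fun d => ! t.contains d)))^[L] [([], (0 : Int))]).map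
          (fun u => (t ++ u.1, s + u.2)) := by
  induction L with
  | zero => intro A t s; simp
  | succ L ih =>
    intro A t s
    rw [Function.iterate_succ_apply, pv_dvStep_singleton, pv_iter_flatMap,
      List.flatMap_map]
    have hrhs : (dvStep (A.filter (fun d => ! t.contains d)))^[L+1] [([], (0 : Int))]
        = (A.filter (fun d => ! t.contains d)).flatMap (fun d =>
            ((dvStep ((A.filter (fun e => ! t.contains e)).filter (fun e => ! ([d].contains e))))^[L]
              [([], (0 : Int))]).map (fun u => ([d] ++ u.1, (0 + d) + u.2))) := by
      rw [Function.iterate_succ_apply, pv_dvStep_singleton]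
      simp only [List.contains_nil, Bool.not_false, List.filter_true]
      rw [pv_iter_flatMap, List.flatMap_map]
      apply pv_flatMap_congr_mem
      intro d _
      exact ih _ [d] (0 + d)
    rw [hrhs, List.map_flatMap]
    apply pv_flatMap_congr_mem
    intro d _
    rw [ih A (t ++ [d]) (s + d), pv_filter_append_contains]
    have hfe : (A.filter (fun e => ! t.contains e)).filter (fun e => ! (e == d))
        = (A.filter (fun e => ! t.contains e)).filter (fun e => ! ([d].contains e)) := by
      apply List.filter_congr; intro e _; rw [pv_contains_singleton]
    rw [hfe, List.map_map]
    apply List.map_congr_left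
    intro u _
    simp only [Function.comp_apply]
    refine Prod.ext ?_ ?_
    · simp [List.append_assoc]
    · simp only [zero_add, add_assoc]

theorem pv_iter_eq_seqsD : ∀ (L : Nat) (A : List Int),
    (dvStep A)^[L] [([], (0 : Int))] = seqsD A L := by
  intro L
  induction L with
  | zero => intro A; rfl
  | succ L ih =>
    intro A
    rw [Function.iterate_succ_apply, pv_dvStep_singleton]
    simp only [List.contains_nil, Bool.not_false, List.filter_true]
    rw [pv_iter_flatMap, List.flatMap_map]
    show A.flatMap (fun d => (dvStep A)^[L] [([d], 0 + d)]) = seqsD A (L+1)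
    simp only [seqsD]
    apply pv_flatMap_congr_mem
    intro d _
    rw [pv_shift L A [d] (0 + d)]
    have hfe : A.filter (fun e => ! ([d].contains e)) = A.filter (fun e => ! (e == d)) := by
      apply List.filter_congr; intro e _; rw [pv_contains_singleton]
    rw [hfe, ih]
    apply List.map_congr_left
    intro u _
    refine Prod.ext ?_ ?_
    · simp
    · simp only [zero_add]

-- ---------- seqsD facts ----------
theorem pv_seqsD_nil_of_lt : ∀ (L : Nat) (A : List Int), A.length < L → seqsD A L = [] := by
  intro L
  induction L with
  | zero => intro A h; omega
  | succ L ih =>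
    intro A h
    simp only [seqsD]
    apply List.flatMap_eq_nil_iff.mpr
    intro d hd
    have hlt : (A.filter (fun e => ! (e == d))).length < A.length := by
      apply List.length_filter_lt_length_iff_exists.mpr
      exact ⟨d, hd, by simp⟩
    rw [ih _ (by omega)]; rfl

theorem pv_seqsD_snd_nonneg : ∀ (L : Nat) (A : List Int), (∀ a ∈ A, 0 ≤ a) →
    ∀ u ∈ seqsD A L, 0 ≤ u.2 := by
  intro L
  induction L with
  | zero => intro A _ u hu; simp only [seqsD, List.mem_singleton] at hu; subst hu; simp
  | succ L ih =>
    intro A hA u hu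
    simp only [seqsD, List.mem_flatMap, List.mem_map] at hu
    obtain ⟨d, hd, v, hv, rfl⟩ := hu
    have h1 := ih _ (fun a ha => hA a (List.mem_of_mem_filter ha)) v hv
    have h2 := hA d hd
    simp only []
    omega

-- ---------- availOf facts ----------
theorem pv_mem_availOf (sd : List Char) (d : Int) (hd : d ∈ availOf sd) : 1 ≤ d ∧ d ≤ 9 :=
  pv_mem_pyR d (List.mem_of_mem_filter hd)

theorem pv_availOf_len (sd : List Char) : (availOf sd).length ≤ 9 := by
  have := List.length_filter_le
    (fun d => ! PySem.Chars.isIn (PySem.Int.toChars d) sd) (PySem.List.pyRange 1 10 1)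
  simpa using this

theorem pv_availOf_append (sd : List Char) (d : Int) (h1 : 1 ≤ d) (h2 : d ≤ 9) :
    availOf (sd ++ PySem.Int.toChars d) = (availOf sd).filter (fun e => ! (e == d)) := by
  unfold availOf
  rw [List.filter_filter]
  apply List.filter_congr
  intro e he
  obtain ⟨he1, he2⟩ := pv_mem_pyR e he
  rw [pv_toChars_digit d h1 h2, pv_toChars_digit e he1 he2,
    pv_isIn_single, pv_isIn_single, List.contains_append, pv_contains_singleton,
    pv_digitChar_beq e d he1 he2 h1 h2]
  cases hc : (sd.contains (Char.ofNat (48 + e.toNat))) <;> cases hb : (e == d) <;> rfl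

theorem pv_availB_eq (sdl : List Char) :
    (PySem.List.pyRange 1 10 1).filter (fun d =>
        ! PySem.Set.contains (PySem.Set.ofList (sdl.map (fun c => [c]))) (PySem.Int.toChars d))
      = availOf sdl := by
  unfold availOf
  apply List.filter_congr
  intro d hd
  obtain ⟨h1, h2⟩ := pv_mem_pyR d hd
  rw [pv_toChars_digit d h1 h2, pv_isIn_single]
  congr 1
  rw [PySem.Set.contains_eq_listContains, ← Bool.coe_iff_coe]
  rw [List.contains_iff_mem, List.contains_iff_mem, PySem.Set.mem_ofList]
  simp

-- ---------- dvAux facts ----------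
theorem pv_dvAux_base (fuel : Nat) (sd : List Char) (nv cs sc : Int)
    (h : (sd.length : Int) = nv) (hf : 0 < fuel) :
    dvAux fuel sd nv cs sc = Sum.inl (decide (cs = sc)) := by
  obtain ⟨f, rfl⟩ : ∃ f, fuel = f + 1 := ⟨fuel - 1, by omega⟩
  by_cases hc : cs = sc <;> simp [dvAux, h, hc]

theorem pv_dvAux_gt (nv sc : Int) : ∀ (fuel : Nat) (sd : List Char) (cs : Int),
    nv < (sd.length : Int) → dvAux fuel sd nv cs sc = Sum.inr [] := by
  intro fuel
  induction fuel with
  | zero => intro sd cs _; rfl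
  | succ f ih =>
    intro sd cs h
    have hne : ¬ ((sd.length : Int) = nv) := by omega
    simp only [dvAux, hne, if_false]
    congr 1
    rw [PySem.List.foldl_congr_mem _ _ (fun acc _ => acc) _ ?_]
    · exact PySem.List.foldl_ignore _ _
    · intro acc i _
      by_cases hs : (PySem.Chars.isIn (PySem.Int.toChars i) sd || decide (cs + i > sc)) = true
      · simp [hs]
      · simp only [Bool.not_eq_true] at hs
        have hlen : nv < ((sd ++ PySem.Int.toChars i).length : Int) := by
          simp only [List.length_append]; push_cast; omega
        simp [hs, ih _ _ hlen]

theorem pv_dvAux_unfold (f : Nat) (sd : List Char) (nv cs sc : Int)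
    (hne : (sd.length : Int) ≠ nv) :
    dvAux (f+1) sd nv cs sc = Sum.inr ((availOf sd).flatMap (fun i =>
      if cs + i > sc then []
      else match dvAux f (sd ++ PySem.Int.toChars i) nv (cs + i) sc with
        | Sum.inl false => []
        | Sum.inl true  => [sd ++ PySem.Int.toChars i]
        | Sum.inr r     => r)) := by
  simp only [dvAux, hne, if_false]
  congr 1
  rw [PySem.List.foldl_congr_mem _ _ (fun acc i => acc ++
      (if PySem.Chars.isIn (PySem.Int.toChars i) sd || decide (cs + i > sc) then []
       else match dvAux f (sd ++ PySem.Int.toChars i) nv (cs + i) sc with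
         | Sum.inl false => []
         | Sum.inl true  => [sd ++ PySem.Int.toChars i]
         | Sum.inr r     => r)) _ ?_]
  · rw [PySem.List.foldl_append_eq_flatMap, List.nil_append]
    rw [pv_flatMap_filter_eq (PySem.List.pyRange 1 10 1)
      (fun i => ! PySem.Chars.isIn (PySem.Int.toChars i) sd) _ ?_]
    · apply pv_flatMap_congr_mem
      intro i hi
      have hisin : PySem.Chars.isIn (PySem.Int.toChars i) sd = false := by
        have := List.of_mem_filter hi; simpa using this
      rw [hisin]
      by_cases hgt : cs + i > sc <;> simp [hgt]
    · intro i _ hq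
      simp only [Bool.not_eq_false'] at hq
      simp [hq]
  · intro acc i _
    by_cases hs : (PySem.Chars.isIn (PySem.Int.toChars i) sd || decide (cs + i > sc)) = true
    · simp [hs]
    · simp only [Bool.not_eq_true] at hs
      cases hr : dvAux f (sd ++ PySem.Int.toChars i) nv (cs + i) sc with
       | inl b => cases b <;> simp [hs, hr]
       | inr r => simp [hs, hr]

theorem pv_dvAux_main (nv sc : Int) : ∀ (L fuel : Nat) (sd : List Char) (cs : Int),
    (availOf sd).length < fuel → (sd.length : Int) + ((L : Int) + 1) = nv →
    dvAux fuel sd nv cs sc = Sum.inr (ansD sd cs sc (L + 1)) := by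
  intro L
  induction L with
  | zero =>
    intro fuel sd cs hf hlen
    obtain ⟨f, rfl⟩ : ∃ f, fuel = f + 1 := ⟨fuel - 1, by omega⟩
    have hne : (sd.length : Int) ≠ nv := by omega
    rw [pv_dvAux_unfold f sd nv cs sc hne]
    congr 1
    unfold ansD
    simp only [seqsD]
    rw [pv_filterMap_flatMap]
    apply pv_flatMap_congr_mem
    intro d hd
    obtain ⟨h1, h2⟩ := pv_mem_availOf sd d hd
    have hfpos : 0 < f := by
      have := List.length_pos_of_mem hd; omega
    have hlen' : ((sd ++ PySem.Int.toChars d).length : Int) = nv := by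
      rw [pv_toChars_digit d h1 h2]
      simp only [List.length_append, List.length_cons, List.length_nil]
      push_cast
      omega
    rw [List.filterMap_map]
    by_cases hb : cs + d = sc
    · have hng : ¬ (cs + d > sc) := by omega
      rw [if_neg hng, pv_dvAux_base f _ nv (cs + d) sc hlen' hfpos]
      simp [hb]
    · by_cases hgt : cs + d > sc
      · rw [if_pos hgt]
        symm
        simp only [List.filterMap_cons, List.filterMap_nil, Function.comp_apply]
        rw [if_neg (show ¬ (cs + (d + (0:Int)) = sc) from by omega)]
      · rw [if_neg hgt, pv_dvAux_base f _ nv (cs + d) sc hlen' hfpos]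
        simp [hb]
  | succ L ih =>
    intro fuel sd cs hf hlen
    obtain ⟨f, rfl⟩ : ∃ f, fuel = f + 1 := ⟨fuel - 1, by omega⟩
    have hne : (sd.length : Int) ≠ nv := by omega
    rw [pv_dvAux_unfold f sd nv cs sc hne]
    congr 1
    unfold ansD
    conv_rhs => rw [show (L + 1 + 1) = ((L + 1) + 1) from rfl]
    simp only [seqsD]
    rw [pv_filterMap_flatMap]
    apply pv_flatMap_congr_mem
    intro d hd
    obtain ⟨h1, h2⟩ := pv_mem_availOf sd d hd
    rw [List.filterMap_map]
    by_cases hgt : cs + d > sc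
    · rw [if_pos hgt]
      symm
      apply List.filterMap_eq_nil_iff.mpr
      intro u hu
      have hnn : 0 ≤ u.2 := by
        refine pv_seqsD_snd_nonneg (L+1) _ ?_ u hu
        intro a ha
        have := pv_mem_availOf sd a (List.mem_of_mem_filter ha)
        omega
      have hne2 : ¬ (cs + (d + u.2) = sc) := by omega
      simp [hne2]
    · have hchild : availOf (sd ++ PySem.Int.toChars d)
          = (availOf sd).filter (fun e => ! (e == d)) := pv_availOf_append sd d h1 h2
      have hfl : (availOf (sd ++ PySem.Int.toChars d)).length < f := by
        rw [hchild]
        have hlt : ((availOf sd).filter (fun e => ! (e == d))).length < (availOf sd).length :=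
          List.length_filter_lt_length_iff_exists.mpr ⟨d, hd, by simp⟩
        omega
      have hlen' : ((sd ++ PySem.Int.toChars d).length : Int) + ((L : Int) + 1) = nv := by
        rw [pv_toChars_digit d h1 h2]
        simp only [List.length_append, List.length_cons, List.length_nil]
        push_cast
        push_cast at hlen
        omega
      rw [if_neg hgt, ih f _ (cs + d) hfl hlen']
      show ansD (sd ++ PySem.Int.toChars d) (cs + d) sc (L+1) = _
      unfold ansD
      rw [hchild]
      apply List.filterMap_congr
      intro u hu
      dsimp only [Function.comp_apply]
      by_cases hc : cs + (d + u.2) = sc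
      · rw [if_pos (show cs + d + u.2 = sc by omega), if_pos hc]
        simp [pv_toChars_digit d h1 h2, List.append_assoc]
      · rw [if_neg (show ¬ (cs + d + u.2 = sc) by omega), if_neg hc]

theorem pv_match_inr (x : List (List Char)) :
    (match (Sum.inr x : Bool ⊕ List (List Char)) with
     | Sum.inr l => List.map String.ofList l
     | Sum.inl _ => ([] : List String)) = x.map String.ofList := rfl

-- ---------- verdict ----------
theorem Domain_values_spec : Claim_equal_Domain_values := by
  intro sd nv cs sc hdom hpre
  unfold Spec_Domain_values Domain_values Domain_values_alt
  unfold Pre_Domain_values at hpre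
  dsimp only
  rw [pv_availB_eq sd.toList]
  rcases lt_trichotomy ((sd.toList.length : Int)) nv with hlt | heq | hgt
  · -- len < nv
    have hpos : 0 < nv - (sd.toList.length : Int) := by omega
    obtain ⟨L, hL⟩ : ∃ L : Nat, (nv - (sd.toList.length : Int)).toNat = L + 1 :=
      ⟨(nv - (sd.toList.length : Int)).toNat - 1, by omega⟩
    have hlen : ((sd.toList.length : Int)) + ((L : Int) + 1) = nv := by omega
    have hav : (availOf sd.toList).length < 10 :=
      lt_of_le_of_lt (pv_availOf_len _) (by norm_num)
    rw [pv_dvAux_main nv sc L 10 sd.toList cs hav hlen]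
    by_cases hcap : ((availOf sd.toList).length : Int) < nv - (sd.toList.length : Int)
    · rw [if_pos (by simp only [Bool.or_eq_true, decide_eq_true_eq]; right; exact hcap)]
      have hsmall : (availOf sd.toList).length < L + 1 := by omega
      unfold ansD
      rw [pv_seqsD_nil_of_lt _ _ hsmall]
      simp
    · rw [if_neg (by
        simp only [Bool.or_eq_true, decide_eq_true_eq]
        omega)]
      rw [pv_foldl_range_iter, hL, pv_iter_eq_seqsD]
      unfold ansD
      rw [pv_match_inr, List.map_filterMap]
      apply List.filterMap_congr
      intro u hu
      by_cases hc : cs + u.2 = sc <;> simp [hc]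
  · exact absurd heq hpre
  · -- nv < len
    rw [pv_dvAux_gt nv sc 10 sd.toList cs hgt]
    rw [if_pos (by simp only [Bool.or_eq_true, decide_eq_true_eq]; left; omega)]
    simp
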